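-- pv_equiv track=rewrite | github.com/olgaObnosova/EGE_4 | 23/яндекс_шастин.py | f
-- ===== SOURCE A (Python) =====
-- def f(start, stop, k):
--     if start>stop:
--         return 0
--     elif start==stop and (k[-1]=='A' or k[-1]=='B'):
--         return 1
--     elif start==stop and (not(k[-1]=='A' or k[-1]=='B')):
--         return 0
--
--     return f(start+2, stop, k+'A')+\
--            f(start*2, stop, k+'C')+f(start+5, stop, k+'B')
-- ===== SOURCE B (Python) =====
-- def f(start, stop, k):
--     # Bottom-up DP: w holds, in order of computation, the counts for the values
--     # stop-1, stop-2, ..., filled down to start, instead of A's 3-way recursion over strings.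
--     if start > stop:
--         return 0
--     if start == stop:
--         return 1 if (k[-1] == 'A' or k[-1] == 'B') else 0
--     w = []
--     s = stop - 1
--     while s >= start:
--         def val(t, ok):
--             if t == stop:
--                 return 1 if ok else 0
--             if t < stop:
--                 return w[stop - 1 - t]
--             return 0
--         w.append(val(s + 2, True) + val(s * 2, False) + val(s + 5, True))
--         s -= 1
--     return w[stop - 1 - start]
-- ===== Notes on version B (the rewrite author's own statement) =====
-- stated objective: alternative
-- what changed: Replaced A's 3-way recursion over operation strings with an iterative bottom-up dynamic-programming table over the values stop-1..start, exploiting that only the last appended character matters.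
import Mathlib
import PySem

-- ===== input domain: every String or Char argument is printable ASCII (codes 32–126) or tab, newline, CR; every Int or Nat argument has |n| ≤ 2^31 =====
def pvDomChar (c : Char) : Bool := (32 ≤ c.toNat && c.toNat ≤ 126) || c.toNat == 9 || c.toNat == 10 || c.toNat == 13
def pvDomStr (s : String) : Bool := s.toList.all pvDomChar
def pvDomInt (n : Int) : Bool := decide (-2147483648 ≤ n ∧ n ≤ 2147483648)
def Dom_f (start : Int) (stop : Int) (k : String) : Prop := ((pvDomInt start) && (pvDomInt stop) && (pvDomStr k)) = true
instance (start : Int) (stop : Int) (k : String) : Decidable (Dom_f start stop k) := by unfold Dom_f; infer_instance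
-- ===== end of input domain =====

-- B replaces A's 3-way recursion over operation strings by an iterative bottom-up
-- DP table over the values stop-1 .. start (objective: alternative algorithm).

-- ===== PORT A =====
-- k[-1]=='A' or k[-1]=='B'; none = IndexError on empty k (excluded by Pre_), false there
def lastAB (k : List Char) : Bool :=
  match PySem.List.pyGet? k (-1) with
  | some c => c == 'A' || c == 'B'
  | none => false

-- the recursion of A, with fuel (A diverges when start < stop and start ≤ 0 —
-- excluded by Pre_; on Pre_ the fuel chosen in f is sufficient, proved below)
def fRec (stop : Int) : Nat → Int → List Char → Int
  | 0, _, _ => 0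
  | fuel + 1, start, k =>
    if start > stop then 0
    else if start = stop ∧ lastAB k then 1
    else if start = stop ∧ ¬ (lastAB k = true) then 0
    else fRec stop fuel (start + 2) (k ++ ['A']) + fRec stop fuel (start * 2) (k ++ ['C'])
         + fRec stop fuel (start + 5) (k ++ ['B'])

def f (start : Int) (stop : Int) (k : String) : Int :=
  fRec stop ((stop - start).toNat + 1) start k.toList

-- ===== PORT B =====
-- 1 if k[-1] == 'A' or k[-1] == 'B' else 0 of Source B (none = IndexError on empty k, excluded by Pre_)
def lastAB_alt (k : List Char) : Int :=
  match PySem.List.pyGet? k (-1) with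
  | some c => if c == 'A' || c == 'B' then 1 else 0
  | none => 0

-- val(t, ok) of Source B over the table w (w[stop-1-t]); the read is in range whenever
-- Pre_ holds, so .getD 0 is never the raising case of Python's w[...] there
def valB (stop : Int) (w : List Int) (t : Int) (ok : Bool) : Int :=
  if t = stop then (if ok then 1 else 0)
  else if t < stop then (PySem.List.pyGet? w (stop - 1 - t)).getD 0
  else 0

-- the while loop of Source B: s runs from stop-1 down to start, appending to w
def loopB (start stop : Int) (s : Int) (w : List Int) : List Int :=
  if s ≥ start then
    loopB start stop (s - 1)
      (w ++ [valB stop w (s + 2) true + valB stop w (s * 2) false + valB stop w (s + 5) true])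
  else w
termination_by (s - start + 1).toNat
decreasing_by omega

def f_alt (start : Int) (stop : Int) (k : String) : Int :=
  if start > stop then 0
  else if start = stop then lastAB_alt k.toList
  else ((PySem.List.pyGet? (loopB start stop (stop - 1) []) (stop - 1 - start)).getD 0)

-- ===== PRECONDITION & SPEC =====
-- Pre_ excludes exactly the inputs where A does not return: start == stop with k == ''
-- (IndexError on k[-1]) and start < stop with start ≤ 0 (infinite recursion through
-- the doubling branch: RecursionError).
def Pre_f (start : Int) (stop : Int) (k : String) : Prop :=
  (start < stop → 1 ≤ start) ∧ (start = stop → k ≠ "")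
instance (start : Int) (stop : Int) (k : String) : Decidable (Pre_f start stop k) := by
  unfold Pre_f; infer_instance

def pvWitness_f : Int × Int × String := (1, 10, "x")

def Spec_f (start : Int) (stop : Int) (k : String) (out : Int) : Prop := out = f_alt start stop k
instance (start : Int) (stop : Int) (k : String) (out : Int) : Decidable (Spec_f start stop k out) := by
  unfold Spec_f; infer_instance

-- ===== CLAIM (what is proved, stated in full; the proofs are below) =====
def Claim_equal_f : Prop := ∀ (start : Int) (stop : Int) (k : String), Dom_f start stop k → Pre_f start stop k → Spec_f start stop k (f start stop k)

-- ===== LEMMAS AND PROOFS =====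

-- the canonical value of A's recursion below stop (fuel-sufficient, k irrelevant)
def Wref (stop s : Int) : Int := fRec stop ((stop - s).toNat + 1) s []

-- the DP segment: counts for stop-1, stop-2, …, stop-m
def seg (stop : Int) (m : Nat) : List Int :=
  (List.range m).map (fun (j : Nat) => Wref stop (stop - 1 - (j : Int)))

theorem seg_length (stop : Int) (m : Nat) : (seg stop m).length = m := by
  simp [seg]

theorem seg_getElem (stop : Int) (m j : Nat) (h : j < (seg stop m).length) :
    (seg stop m)[j] = Wref stop (stop - 1 - (j : Int)) := by
  unfold seg at h ⊢
  rw [List.getElem_map, List.getElem_range]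

theorem lastAB_append (k : List Char) (c : Char) :
    lastAB (k ++ [c]) = (c == 'A' || c == 'B') := by
  simp [lastAB, PySem.List.pyGet?_neg_one_append_singleton]

-- fuel and accumulated string are irrelevant for A's recursion (given enough fuel,
-- and agreement of the last character at the s = stop base case)
theorem fRec_congr (stop : Int) :
    ∀ fuel fuel' : Nat, ∀ s : Int, ∀ k k' : List Char, 1 ≤ s →
      (stop - s).toNat < fuel → (stop - s).toNat < fuel' →
      (s = stop → lastAB k = lastAB k') →
      fRec stop fuel s k = fRec stop fuel' s k' := by
  intro fuel
  induction fuel using Nat.strong_induction_on with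
  | _ fuel IH =>
    intro fuel' s k k' hs hf hf' hlast
    match fuel, fuel', hf, hf' with
    | a + 1, b + 1, hf, hf' =>
      by_cases hgt : s > stop
      · simp [fRec, hgt]
      · by_cases heq : s = stop
        · subst heq
          have hk := hlast rfl
          cases hab : lastAB k' <;> simp [fRec, hk, hab]
        · have hlt : s < stop := by omega
          simp only [fRec, if_neg (by omega : ¬ s > stop)]
          rw [if_neg (by simp [heq]), if_neg (by simp [heq]),
              if_neg (by simp [heq]), if_neg (by simp [heq])]
          have step : ∀ t : Int, ∀ c : Char, s + 1 ≤ t →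
              fRec stop a t (k ++ [c]) = fRec stop b t (k' ++ [c]) := by
            intro t c ht
            by_cases htle : t ≤ stop
            · exact IH a (by omega) b t (k ++ [c]) (k' ++ [c]) (by omega)
                (by omega) (by omega)
                (fun _ => by rw [lastAB_append, lastAB_append])
            · match a, b, (by omega : 1 ≤ a), (by omega : 1 ≤ b) with
              | a1 + 1, b1 + 1, _, _ => simp [fRec, (by omega : t > stop)]
          rw [step (s + 2) 'A' (by omega), step (s * 2) 'C' (by omega),
              step (s + 5) 'B' (by omega)]

theorem fRec_eq_Wref (stop : Int) (fuel : Nat) (s : Int) (k : List Char)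
    (hs : 1 ≤ s) (hlt : s < stop) (hf : (stop - s).toNat < fuel) :
    fRec stop fuel s k = Wref stop s :=
  fRec_congr stop fuel ((stop - s).toNat + 1) s k [] hs hf (by omega)
    (fun h => absurd h (by omega))

-- one child call of A's recursion equals Source B's val over the DP segment
theorem child_val (stop : Int) (fuel m : Nat) (t : Int) (c : Char)
    (ht1 : 1 ≤ t) (htm : stop - (m : Int) ≤ t) (hfuel : (stop - t).toNat < fuel) :
    fRec stop fuel t [c] = valB stop (seg stop m) t (c == 'A' || c == 'B') := by
  by_cases hgt : t > stop
  · match fuel, (by omega : 1 ≤ fuel) with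
    | a + 1, _ =>
      rw [fRec, if_pos hgt, valB, if_neg (by omega), if_neg (by omega)]
  · by_cases heq : t = stop
    · match fuel, (by omega : 1 ≤ fuel) with
      | a + 1, _ =>
        have hc : lastAB [c] = (c == 'A' || c == 'B') := by
          simpa using lastAB_append [] c
        cases hok : (c == 'A' || c == 'B') <;>
          simp [fRec, valB, heq, hc, hok]
    · have hlt : t < stop := by omega
      rw [fRec_eq_Wref stop fuel t [c] ht1 hlt hfuel]
      have hidx0 : (0 : Int) ≤ stop - 1 - t := by omega
      have hidxm : stop - 1 - t < (m : Int) := by omega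
      rw [valB, if_neg heq, if_pos hlt,
          PySem.List.pyGet?_eq_some_getElem _ hidx0 (by rw [seg_length]; omega)]
      rw [Option.getD_some, seg_getElem]
      congr 1
      omega

-- loop invariant: starting from the segment for stop-1 .. s+1, the loop produces
-- the full segment for stop-1 .. start
theorem loopB_inv (start stop : Int) (h1 : 1 ≤ start) :
    ∀ N : Nat, ∀ s : Int, s - (start - 1) = (N : Int) → s ≤ stop - 1 →
      loopB start stop s (seg stop (stop - 1 - s).toNat) = seg stop (stop - start).toNat := by
  intro N
  induction N with
  | zero =>
    intro s hsN _
    have hs : s = start - 1 := by omega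
    subst hs
    rw [loopB, if_neg (by omega)]
    congr 1
    omega
  | succ n IH =>
    intro s hsN hle
    have hsge : start ≤ s := by omega
    rw [loopB, if_pos (by omega)]
    set m := (stop - 1 - s).toNat with hmdef
    have hval : valB stop (seg stop m) (s + 2) true
        + valB stop (seg stop m) (s * 2) false
        + valB stop (seg stop m) (s + 5) true = Wref stop s := by
      have hexp : Wref stop s
          = fRec stop ((stop - s).toNat) (s + 2) ([] ++ ['A'])
            + fRec stop ((stop - s).toNat) (s * 2) ([] ++ ['C'])
            + fRec stop ((stop - s).toNat) (s + 5) ([] ++ ['B']) := by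
        rw [Wref, fRec,
            if_neg (by omega : ¬ s > stop),
            if_neg (fun hc => (by omega : s ≠ stop) hc.1),
            if_neg (fun hc => (by omega : s ≠ stop) hc.1)]
      rw [hexp]
      simp only [List.nil_append]
      rw [child_val stop _ m (s + 2) 'A' (by omega) (by omega) (by omega),
          child_val stop _ m (s * 2) 'C' (by omega) (by omega) (by omega),
          child_val stop _ m (s + 5) 'B' (by omega) (by omega) (by omega)]
      rfl
    have hseg : seg stop m ++ [Wref stop s] = seg stop (stop - 1 - (s - 1)).toNat := by
      have hm1 : (stop - 1 - (s - 1)).toNat = m + 1 := by omega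
      have hs' : stop - 1 - (m : Int) = s := by omega
      simp only [hm1, seg, List.range_succ, List.map_append, List.map_cons,
        List.map_nil, hs']
    rw [hval, hseg]
    exact IH (s - 1) (by omega) (by omega)

-- ===== VERDICT (by name: the statement is the Claim_ definition above) =====
theorem f_spec : Claim_equal_f := by
  intro start stop k _ hpre
  unfold Spec_f f f_alt
  by_cases hgt : start > stop
  · have h0 : (stop - start).toNat = 0 := by omega
    rw [h0]
    simp [fRec, hgt]
  · by_cases heq : start = stop
    · have h0 : (stop - start).toNat = 0 := by omega
      rw [h0]
      by_cases hab : lastAB k.toList = true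
      · have : lastAB_alt k.toList = 1 := by
          simp only [lastAB, lastAB_alt] at hab ⊢
          rcases h : PySem.List.pyGet? k.toList (-1) with _ | c <;> rw [h] at hab <;>
            simp_all
        simp [fRec, heq, hab, this]
      · have : lastAB_alt k.toList = 0 := by
          simp only [lastAB, lastAB_alt] at hab ⊢
          rcases h : PySem.List.pyGet? k.toList (-1) with _ | c <;> rw [h] at hab <;>
            simp_all
        simp [fRec, heq, hab, this]
    · have hlt : start < stop := by omega
      have h1 : 1 ≤ start := hpre.1 hlt
      rw [if_neg hgt, if_neg heq]
      rw [fRec_eq_Wref stop _ start k.toList h1 hlt (by omega)]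
      have hinit : (seg stop (stop - 1 - (stop - 1)).toNat) = ([] : List Int) := by
        have : (stop - 1 - (stop - 1)).toNat = 0 := by omega
        rw [this]; rfl
      rw [← hinit,
          loopB_inv start stop h1 (stop - start).toNat (stop - 1) (by omega) (by omega)]
      have hidx0 : (0 : Int) ≤ stop - 1 - start := by omega
      rw [PySem.List.pyGet?_eq_some_getElem _ hidx0 (by rw [seg_length]; omega)]
      rw [Option.getD_some, seg_getElem]
      congr 1
      omega
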